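-- pv_equiv track=rewrite | github.com/Saintghetto17/Python-SHAD | 02.1.DataStructures/tasks/min_to_drop/min_to_drop.py | get_min_to_drop
-- ===== SOURCE A (Python) =====
-- import typing as tp
-- from collections import Counter
--
-- def get_min_to_drop(seq: tp.Sequence[tp.Any]) -> int:
--     """
--     :param seq: sequence of elements
--     :return: number of elements need to drop to leave equal elements
--     """
--     cnt = Counter(seq)
--     dictionary = dict(cnt)
--     keys = list(dictionary.keys())
--     max = 0
--     for e in keys:
--         if (dictionary[e] > max):
--             max = dictionary[e]
--         else:
--             continue
--     return len(seq) - max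
-- ===== SOURCE B (Python) =====
-- import typing as tp
--
--
-- def get_min_to_drop(seq: tp.Sequence[tp.Any]) -> int:
--     """
--     :param seq: sequence of elements
--     :return: number of elements need to drop to leave equal elements
--     """
--     s = sorted(seq)
--     best = 0
--     run = 0
--     prev = None
--     have_prev = False
--     for x in s:
--         if have_prev and x == prev:
--             run += 1
--         else:
--             run = 1
--         if run > best:
--             best = run
--         prev = x
--         have_prev = True
--     return len(seq) - best
-- ===== Notes on version B (the rewrite author's own statement) =====
-- stated objective: alternative
-- what changed: Replaces the Counter/dict frequency table and key-max loop by sort-then-scan: sort the sequence so equal elements become contiguous, then one linear pass tracks the current run length and the longest run, returning len(seq) minus the longest run.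
import Mathlib
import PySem

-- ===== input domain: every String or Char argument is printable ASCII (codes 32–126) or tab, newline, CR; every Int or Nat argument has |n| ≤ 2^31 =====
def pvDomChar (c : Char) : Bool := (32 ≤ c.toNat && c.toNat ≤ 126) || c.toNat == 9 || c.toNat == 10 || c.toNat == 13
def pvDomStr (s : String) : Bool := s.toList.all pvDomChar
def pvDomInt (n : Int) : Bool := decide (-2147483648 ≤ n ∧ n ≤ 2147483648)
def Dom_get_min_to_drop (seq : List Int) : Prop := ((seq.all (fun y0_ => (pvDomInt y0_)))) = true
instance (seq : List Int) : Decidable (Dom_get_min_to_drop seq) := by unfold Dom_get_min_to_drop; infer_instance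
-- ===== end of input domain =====

-- B replaces the Counter/dict frequency table by sort-then-scan: one pass over the
-- sorted list tracking the longest run of equal elements (alternative algorithm;
-- return value only, no mutation).

-- ===== PORT A =====
-- cnt = Counter(seq); dictionary = dict(cnt) (an order-preserving copy, identity here);
-- keys = list(dictionary.keys()); loop updating max; return len(seq) - max.
-- dictionary[e] is ported as getD e 0, exact because e is drawn from dictionary's keys.
def get_min_to_drop (seq : List Int) : Int :=
  let cnt : PySem.Dict Int Int := PySem.Dict.counter seq
  let dictionary : PySem.Dict Int Int := cnt
  let keys : List Int := dictionary.keys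
  let m : Int := keys.foldl
    (fun m e => if dictionary.getD e 0 > m then dictionary.getD e 0 else m) 0
  (seq.length : Int) - m

-- ===== PORT B =====
-- loop body of Source B: state (best, run, prev); Python's prev/have_prev pair is the Option.
def pvStep (st : Int × Int × Option Int) (x : Int) : Int × Int × Option Int :=
  let run' := if st.2.2 = some x then st.2.1 + 1 else 1
  let best' := if run' > st.1 then run' else st.1
  (best', run', some x)

-- s = sorted(seq); scan s keeping the longest run; return len(seq) - best.
def get_min_to_drop_alt (seq : List Int) : Int :=
  let s := PySem.List.sorted seq (fun x => x) false
  (seq.length : Int) - (s.foldl pvStep (0, 0, none)).1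

-- ===== PRECONDITION & SPEC =====
def Spec_get_min_to_drop (seq : List Int) (out : Int) : Prop := out = get_min_to_drop_alt seq
instance (seq : List Int) (out : Int) : Decidable (Spec_get_min_to_drop seq out) := by unfold Spec_get_min_to_drop; infer_instance

-- ===== CLAIM =====
def Claim_equal_get_min_to_drop : Prop := ∀ (seq : List Int), Dom_get_min_to_drop seq → Spec_get_min_to_drop seq (get_min_to_drop seq)

-- ===== LEMMAS AND PROOFS =====

-- A's "if f e > m then f e else m" loop is a running max of f over the list.
theorem foldl_if_gt_eq_foldl_max (f : Int → Int) (l : List Int) (init : Int) :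
    l.foldl (fun m e => if f e > m then f e else m) init = (l.map f).foldl max init := by
  induction l generalizing init with
  | nil => rfl
  | cons x xs ih =>
    simp only [List.foldl_cons, List.map_cons]
    rw [ih]
    congr 1
    simp only [gt_iff_lt, max_def]
    split_ifs <;> omega

theorem init_le_foldl_max (m : List Int) (i : Int) : i ≤ m.foldl max i := by
  induction m generalizing i with
  | nil => simp
  | cons a t ih => exact le_trans (le_max_left i a) (ih _)

theorem le_foldl_max (m : List Int) (i x : Int) (hx : x ∈ m) : x ≤ m.foldl max i := by
  induction m generalizing i with
  | nil => cases hx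
  | cons a t ih =>
    rcases List.mem_cons.mp hx with rfl | h
    · exact le_trans (le_max_right i x) (init_le_foldl_max t _)
    · exact ih _ h

theorem foldl_max_mem (m : List Int) (i : Int) : m.foldl max i = i ∨ m.foldl max i ∈ m := by
  induction m generalizing i with
  | nil => left; rfl
  | cons a t ih =>
    simp only [List.foldl_cons]
    rcases ih (max i a) with h | h
    · rw [h]
      rcases max_choice i a with h' | h'
      · left; exact h'
      · right; rw [h']; exact List.mem_cons_self
    · right; exact List.mem_cons_of_mem a h

-- foldl max 0 depends only on the member set.
theorem foldl_max_zero_eq_of_mem_iff (m1 m2 : List Int)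
    (h : ∀ x, x ∈ m1 ↔ x ∈ m2) : m1.foldl max 0 = m2.foldl max 0 := by
  apply le_antisymm
  · rcases foldl_max_mem m1 0 with he | he
    · rw [he]; exact init_le_foldl_max _ _
    · exact le_foldl_max _ _ _ ((h _).mp he)
  · rcases foldl_max_mem m2 0 with he | he
    · rw [he]; exact init_le_foldl_max _ _
    · exact le_foldl_max _ _ _ ((h _).mpr he)

-- Loop invariant for B's scan over a sorted list: prev is the last element, run is its
-- multiplicity, best dominates every multiplicity and is itself one.
theorem pvStep_inv (s : List Int) (hs : s.Pairwise (· ≤ ·)) :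
    (s = [] ∧ s.foldl pvStep (0, 0, none) = (0, 0, none)) ∨
    ∃ v b, s.getLast? = some v ∧
      s.foldl pvStep (0, 0, none) = (b, (s.count v : Int), some v) ∧
      (∀ y ∈ s, y ≤ v) ∧ (∀ y ∈ s, (s.count y : Int) ≤ b) ∧ (∃ z ∈ s, b = (s.count z : Int)) := by
  induction s using List.reverseRecOn with
  | nil => left; exact ⟨rfl, rfl⟩
  | append_singleton p x ih =>
    right
    have hps : p.Pairwise (· ≤ ·) ∧ ∀ y ∈ p, y ≤ x := by
      rw [List.pairwise_append] at hs
      exact ⟨hs.1, fun y hy => hs.2.2 y hy x List.mem_cons_self⟩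
    have hfold : (p ++ [x]).foldl pvStep (0, 0, none) =
        pvStep (p.foldl pvStep (0, 0, none)) x := by
      rw [List.foldl_append]; rfl
    have hcount : ∀ y : Int, (p ++ [x]).count y = p.count y + (if x = y then 1 else 0) := by
      intro y; simp [List.count_append, List.count_singleton]
    rcases ih hps.1 with ⟨hpe, hp0⟩ | ⟨v, b, hlast, hfp, hle, hcb, z, hz, hbz⟩
    · subst hpe
      refine ⟨x, 1, by simp, ?_, ?_, ?_, x, by simp, by simp⟩
      · rw [hfold, hp0]; simp [pvStep]
      · intro y hy; simp at hy; omega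
      · intro y hy; simp at hy; subst hy; simp
    · -- p nonempty, with invariant
      have hvp : v ∈ p := List.mem_of_getLast? hlast
      have hvx : v ≤ x := hps.2 v hvp
      by_cases hvex : v = x
      · -- the run continues
        subst hvex
        have hrun : (p ++ [v]).count v = p.count v + 1 := by
          rw [hcount, if_pos rfl]
        refine ⟨v, if ((p.count v : Int) + 1) > b then (p.count v : Int) + 1 else b,
          List.getLast?_concat, ?_, ?_, ?_, ?_⟩
        · rw [hfold, hfp, hrun]
          simp only [pvStep]
          push_cast
          rfl
        · intro y hy
          rcases List.mem_append.mp hy with h | h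
          · exact hps.2 y h
          · simp at h; omega
        · intro y hy
          by_cases hyv : y = v
          · subst hyv; rw [hrun]; push_cast; split_ifs <;> omega
          · have hcy : (p ++ [v]).count y = p.count y := by
              rw [hcount, if_neg (fun h => hyv h.symm)]; omega
            have hy' : y ∈ p := by
              rcases List.mem_append.mp hy with h | h
              · exact h
              · simp at h; exact absurd h hyv
            have := hcb y hy'
            rw [hcy]; split_ifs <;> omega
        · split_ifs with hgt
          · exact ⟨v, by simp, by rw [hrun]; push_cast; ring⟩
          · refine ⟨z, List.mem_append_left _ hz, ?_⟩
            have hzv : z ≠ v := by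
              intro h; subst h; omega
            rw [hcount, if_neg (fun h => hzv h.symm)]
            omega
      · -- a new run of length 1 starts at x
        have hxp : x ∉ p := by
          intro hxp
          exact hvex (le_antisymm hvx (hle x hxp))
        have hcx0 : p.count x = 0 := List.count_eq_zero.mpr hxp
        have hrun : (p ++ [x]).count x = 1 := by
          rw [hcount, if_pos rfl, hcx0]
        have hb1 : 1 ≤ b := by
          have := List.count_pos_iff.mpr hz
          omega
        refine ⟨x, if (1 : Int) > b then 1 else b, List.getLast?_concat, ?_, ?_, ?_, ?_⟩
        · rw [hfold, hfp, hrun]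
          simp only [pvStep, Option.some.injEq, if_neg hvex]
          push_cast
          rfl
        · intro y hy
          rcases List.mem_append.mp hy with h | h
          · exact le_trans (hps.2 y h) le_rfl
          · simp at h; omega
        · intro y hy
          by_cases hyx : y = x
          · subst hyx; rw [hrun]; push_cast; split_ifs <;> omega
          · have hcy : (p ++ [x]).count y = p.count y := by
              rw [hcount, if_neg (fun h => hyx h.symm)]; omega
            have hy' : y ∈ p := by
              rcases List.mem_append.mp hy with h | h
              · exact h
              · simp at h; exact absurd h hyx
            have := hcb y hy'
            rw [hcy]; split_ifs <;> omega
        · split_ifs with hgt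
          · exact ⟨x, by simp, by rw [hrun]; push_cast⟩
          · refine ⟨z, List.mem_append_left _ hz, ?_⟩
            have hzx : z ≠ x := fun h => hxp (h ▸ hz)
            rw [hcount, if_neg (fun h => hzx h.symm)]
            omega

-- B's best over the sorted list is the running max of counts.
theorem best_eq_foldl_max (s : List Int) (hs : s.Pairwise (· ≤ ·)) :
    (s.foldl pvStep (0, 0, none)).1 =
      (s.map (fun x => (s.count x : Int))).foldl max 0 := by
  rcases pvStep_inv s hs with ⟨rfl, h0⟩ | ⟨v, b, _, hfp, _, hcb, z, hz, hbz⟩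
  · rw [h0]; rfl
  · rw [hfp]
    apply le_antisymm
    · exact le_foldl_max _ _ _ (by exact List.mem_map.mpr ⟨z, hz, hbz.symm⟩)
    · rcases foldl_max_mem (s.map (fun x => (s.count x : Int))) 0 with he | he
      · rw [he]
        have := List.count_pos_iff.mpr hz
        omega
      · rcases List.mem_map.mp he with ⟨y, hy, hye⟩
        rw [← hye]
        exact hcb y hy

-- ===== VERDICT (by name: the statement is the Claim_ definition above) =====
theorem get_min_to_drop_spec : Claim_equal_get_min_to_drop := by
  intro seq _
  unfold Spec_get_min_to_drop get_min_to_drop get_min_to_drop_alt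
  simp only [PySem.Dict.keys_counter, PySem.Dict.getD_counter]
  rw [foldl_if_gt_eq_foldl_max (fun e => (seq.count e : Int))]
  rw [best_eq_foldl_max _ (by simpa using PySem.List.sorted_pairwise seq (fun x => x))]
  congr 1
  apply foldl_max_zero_eq_of_mem_iff
  intro y
  constructor
  · rintro hy
    rcases List.mem_map.mp hy with ⟨e, he, rfl⟩
    have he' : e ∈ seq := (PySem.Set.mem_ofList seq e).mp he
    exact List.mem_map.mpr ⟨e, ((PySem.List.mem_sorted seq (fun x => x) false e).mpr he'), by
      rw [(PySem.List.sorted_perm seq (fun x => x) false).count_eq]⟩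
  · rintro hy
    rcases List.mem_map.mp hy with ⟨e, he, rfl⟩
    have he' : e ∈ seq := ((PySem.List.mem_sorted seq (fun x => x) false e).mp he)
    exact List.mem_map.mpr ⟨e, (PySem.Set.mem_ofList seq e).mpr he', by
      rw [(PySem.List.sorted_perm seq (fun x => x) false).count_eq]⟩
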